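-- pv_equiv track=rewrite | github.com/KevvinPang/-654 | modules/auto_clip_engine/funasr_srt_refine.py | slice_visible_text
-- ===== SOURCE A (Python) =====
-- from typing import List, Sequence
--
-- def slice_visible_text(value: str, start_visible: int, count: int | None = None) -> str:
--     if count is not None and count <= 0:
--         return ""
--     chars: List[str] = []
--     visible_idx = 0
--     started = False
--     collected = 0
--     for ch in value:
--         is_visible = ch.strip() and ch not in "，。？！,.!?、：；“”\"'"
--         if is_visible and visible_idx < start_visible:
--             visible_idx += 1
--             continue
--         if is_visible:
--             started = True
--         if started:
--             chars.append(ch)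
--             if is_visible:
--                 visible_idx += 1
--                 collected += 1
--                 if count is not None and collected >= count:
--                     break
--     return "".join(chars).strip()
-- ===== SOURCE B (Python) =====
-- PUNCT = "，。？！,.!?、：；“”\"'"
--
--
-- def slice_visible_text(value: str, start_visible: int, count: int | None = None) -> str:
--     if count is not None and count <= 0:
--         return ""
--     vis = [i for i, ch in enumerate(value) if ch.strip() and ch not in PUNCT]
--     s = max(start_visible, 0)
--     if s >= len(vis):
--         return ""
--     start = vis[s]
--     if count is None:
--         end = len(value)
--     else:
--         j = s + count - 1
--         end = vis[j] + 1 if j < len(vis) else len(value)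
--     return value[start:end].strip()
-- ===== Notes on version B (the rewrite author's own statement) =====
-- stated objective: simpler
-- what changed: Replaces A's flag-driven streaming collector (visible_idx/started/collected state machine with break) by a two-step decomposition: build the list of visible-character positions once, then compute the slice bounds arithmetically and return value[start:end].strip().
import Mathlib
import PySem

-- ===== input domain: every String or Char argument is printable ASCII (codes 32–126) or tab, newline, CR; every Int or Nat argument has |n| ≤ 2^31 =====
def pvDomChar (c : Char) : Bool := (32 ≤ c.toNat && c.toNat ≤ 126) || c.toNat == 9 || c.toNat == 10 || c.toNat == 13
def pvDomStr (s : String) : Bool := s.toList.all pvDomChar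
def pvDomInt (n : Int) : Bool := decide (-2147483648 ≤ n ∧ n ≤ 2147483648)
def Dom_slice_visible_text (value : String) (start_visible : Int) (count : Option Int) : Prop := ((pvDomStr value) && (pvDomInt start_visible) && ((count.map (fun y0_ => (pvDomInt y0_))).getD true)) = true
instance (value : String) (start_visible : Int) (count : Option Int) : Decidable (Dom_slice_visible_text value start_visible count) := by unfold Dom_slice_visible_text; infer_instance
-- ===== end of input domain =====

-- B replaces A's flag-driven streaming collector by a visible-position index table plus one slice; same O(n) cost, simpler decomposition.


-- ===== PORT A =====
-- the punctuation string literal of both Pythons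
def pvPunct : List Char := "，。？！,.!?、：；“”\"'".toList

-- `ch.strip() and ch not in "…"` — truthiness of the 1-char strip, then substring membership
def pvVis (c : Char) : Bool := !(PySem.Chars.strip [c]).isEmpty && !(PySem.Chars.isIn [c] pvPunct)

-- A's for-loop with its four state variables; `break` = returning `chars` directly
def sliceVisLoop (sv : Int) (count : Option Int) : List Char → List Char → Int → Bool → Int → List Char
  | [], chars, _, _, _ => chars
  | ch :: rest, chars, vi, started, coll =>
    let v := pvVis ch
    if v && decide (vi < sv) then
      sliceVisLoop sv count rest chars (vi + 1) started coll
    else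
      let started' := started || v
      if started' then
        let chars' := chars ++ [ch]
        if v then
          let coll' := coll + 1
          if (match count with | some c => decide (coll' ≥ c) | none => false) then chars'
          else sliceVisLoop sv count rest chars' (vi + 1) started' coll'
        else sliceVisLoop sv count rest chars' vi started' coll
      else sliceVisLoop sv count rest chars vi started coll

def slice_visible_text (value : String) (start_visible : Int) (count : Option Int) : String :=
  if (match count with | some c => decide (c ≤ 0) | none => false) then ""
  else String.mk (PySem.Chars.strip (sliceVisLoop start_visible count value.toList [] 0 false 0))

-- ===== PORT B =====
def slice_visible_text_alt (value : String) (start_visible : Int) (count : Option Int) : String :=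
  if (match count with | some c => decide (c ≤ 0) | none => false) then ""
  else
    let l := value.toList
    let vis : List Int := ((PySem.List.enumerate l 0).filter (fun p => pvVis p.2)).map (fun p => p.1)
    let s := max start_visible 0
    if decide (s ≥ PySem.List.len vis) then ""
    else
      let start := PySem.List.pyGetD vis s 0
      let endI : Int :=
        match count with
        | none => PySem.List.len l
        | some c =>
          let j := s + c - 1
          if decide (j < PySem.List.len vis) then PySem.List.pyGetD vis j 0 + 1
          else PySem.List.len l
      String.mk (PySem.Chars.strip (PySem.List.slice l (some start) (some endI)))

-- ===== PRECONDITION & SPEC =====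
def Spec_slice_visible_text (value : String) (start_visible : Int) (count : Option Int) (out : String) : Prop := out = slice_visible_text_alt value start_visible count
instance (value : String) (start_visible : Int) (count : Option Int) (out : String) : Decidable (Spec_slice_visible_text value start_visible count out) := by unfold Spec_slice_visible_text; infer_instance

-- ===== CLAIM (what is proved, stated in full; the proofs are below) =====
def Claim_equal_slice_visible_text : Prop := ∀ (value : String) (start_visible : Int) (count : Option Int), Dom_slice_visible_text value start_visible count → Spec_slice_visible_text value start_visible count (slice_visible_text value start_visible count)

-- ===== LEMMAS AND PROOFS =====

-- positions (Nat) of the visible characters of a list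
def visPos : List Char → List Nat
  | [] => []
  | ch :: rest => if pvVis ch then 0 :: (visPos rest).map (· + 1) else (visPos rest).map (· + 1)

-- the suffix of l starting at its k-th visible character (A's skip phase)
def afterSkip : List Char → Nat → List Char
  | [], _ => []
  | ch :: rest, k =>
    if pvVis ch then (match k with | 0 => ch :: rest | k' + 1 => afterSkip rest k') else afterSkip rest k

-- A's loop once `started` is true (sv/vi no longer matter)
def loopC (count : Option Int) : List Char → List Char → Int → List Char
  | [], chars, _ => chars
  | ch :: rest, chars, coll =>
    let v := pvVis ch
    let chars' := chars ++ [ch]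
    if v then
      if (match count with | some c => decide (coll + 1 ≥ c) | none => false) then chars'
      else loopC count rest chars' (coll + 1)
    else loopC count rest chars' coll

-- the prefix of m up to and including its j-th visible character (or all of m)
def takeVis : List Char → Int → List Char
  | [], _ => []
  | ch :: rest, j =>
    ch :: (if pvVis ch then (if j ≤ 1 then [] else takeVis rest (j - 1)) else takeVis rest j)

theorem vis_eq (l : List Char) (s : Int) :
    ((PySem.List.enumerate l s).filter (fun p => pvVis p.2)).map (fun p => p.1)
      = (visPos l).map (fun n : Nat => s + (n : Int)) := by
  induction l generalizing s with
  | nil => simp [PySem.List.enumerate_nil, visPos]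
  | cons ch rest ih =>
    rw [PySem.List.enumerate_cons]
    by_cases hv : pvVis ch
    · rw [List.filter_cons_of_pos (by simpa using hv)]
      simp only [List.map_cons, ih (s + 1), visPos, hv, if_true]
      refine List.cons_eq_cons.mpr ⟨by simp, ?_⟩
      rw [List.map_map]
      apply List.map_congr_left
      intro a _; simp; push_cast; ring
    · rw [List.filter_cons_of_neg (by simpa using hv)]
      rw [ih (s + 1)]
      simp only [visPos, hv, if_false, Bool.false_eq_true]
      rw [List.map_map]
      apply List.map_congr_left
      intro a _; simp; push_cast; ring

theorem loopA_eq_loopC (sv : Int) (count : Option Int) (l : List Char) :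
    ∀ chars vi coll, sv ≤ vi →
    sliceVisLoop sv count l chars vi true coll = loopC count l chars coll := by
  induction l with
  | nil => intro chars vi coll _; rfl
  | cons ch rest ih =>
    intro chars vi coll hvi
    have hd : decide (vi < sv) = false := by simp; omega
    by_cases hv : pvVis ch
    · simp only [sliceVisLoop, loopC, hv, hd, Bool.true_and, Bool.false_eq_true, if_false,
        Bool.true_or, if_true]
      split
      · split
        · rfl
        · exact ih _ (vi + 1) (coll + 1) (by omega)
      · simp only [Bool.false_eq_true, if_false]
        exact ih _ (vi + 1) (coll + 1) (by omega)
    · simp [sliceVisLoop, loopC, hv, hd, ih _ vi coll hvi]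

theorem loopA_skip (sv : Int) (count : Option Int) (l : List Char) :
    ∀ vi : Int,
    sliceVisLoop sv count l [] vi false 0 = loopC count (afterSkip l (sv - vi).toNat) [] 0 := by
  induction l with
  | nil => intro vi; cases h : (sv - vi).toNat <;> rfl
  | cons ch rest ih =>
    intro vi
    by_cases hv : pvVis ch
    · by_cases hlt : vi < sv
      · have hk : (sv - vi).toNat = (sv - (vi + 1)).toNat + 1 := by omega
        simp only [sliceVisLoop, hv, hlt, decide_true, Bool.and_true, if_true, hk, afterSkip]
        exact ih (vi + 1)
      · have hk : (sv - vi).toNat = 0 := by omega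
        have hd : decide (vi < sv) = false := by simp; omega
        simp only [sliceVisLoop, hv, hd, Bool.and_false, Bool.false_eq_true, if_false, hk,
          afterSkip, if_true, Bool.true_or, Bool.false_or, loopC, List.nil_append]
        split
        · split
          · rfl
          · exact loopA_eq_loopC sv _ rest [ch] (vi + 1) 1 (by omega)
        · simp only [Bool.false_eq_true, if_false]
          exact loopA_eq_loopC sv _ rest [ch] (vi + 1) 1 (by omega)
    · simp only [sliceVisLoop, hv, Bool.false_and, Bool.or_false, if_false, afterSkip,
        Bool.false_eq_true, if_true]
      exact ih vi

theorem loopC_none (l : List Char) : ∀ chars coll, loopC none l chars coll = chars ++ l := by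
  induction l with
  | nil => intro chars coll; simp [loopC]
  | cons ch rest ih =>
    intro chars coll
    by_cases hv : pvVis ch <;> simp [loopC, hv, ih]

theorem loopC_some (c : Int) (l : List Char) :
    ∀ chars coll, loopC (some c) l chars coll = chars ++ takeVis l (c - coll) := by
  induction l with
  | nil => intro chars coll; simp [loopC, takeVis]
  | cons ch rest ih =>
    intro chars coll
    by_cases hv : pvVis ch
    · by_cases hc : coll + 1 ≥ c
      · have h1 : c - coll ≤ 1 := by omega
        simp [loopC, takeVis, hv, hc, h1]
      · have h1 : ¬ (c - coll ≤ 1) := by omega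
        have h2 : c - (coll + 1) = c - coll - 1 := by omega
        simp [loopC, takeVis, hv, hc, h1, ih, h2]
    · simp [loopC, takeVis, hv, ih]

theorem afterSkip_eq (l : List Char) :
    ∀ k : Nat, afterSkip l k = (match (visPos l)[k]? with | some q => l.drop q | none => []) := by
  induction l with
  | nil => intro k; simp [afterSkip, visPos]
  | cons ch rest ih =>
    intro k
    by_cases hv : pvVis ch
    · match k with
      | 0 => simp [afterSkip, hv, visPos]
      | k' + 1 =>
        simp only [afterSkip, hv, if_true, visPos, ih k', List.getElem?_cons_succ,
          List.getElem?_map]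
        cases h : (visPos rest)[k']? <;> simp [h, List.drop_succ_cons]
    · simp only [afterSkip, hv, if_false, Bool.false_eq_true, visPos, ih k, List.getElem?_map]
      cases h : (visPos rest)[k]? <;> simp [h, List.drop_succ_cons]

theorem visPos_sorted (l : List Char) : (visPos l).Pairwise (· < ·) := by
  induction l with
  | nil => exact List.Pairwise.nil
  | cons ch rest ih =>
    by_cases hv : pvVis ch <;> simp only [visPos, hv, if_true, if_false, Bool.false_eq_true]
    · constructor
      · intro b hb
        simp only [List.mem_map] at hb
        omega
      · exact (List.pairwise_map.mpr (ih.imp (by omega)))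
    · exact (List.pairwise_map.mpr (ih.imp (by omega)))

theorem visPos_drop (l : List Char) :
    ∀ k (h : k < (visPos l).length),
      visPos (l.drop ((visPos l)[k])) = ((visPos l).drop k).map (· - (visPos l)[k]) := by
  induction l with
  | nil => intro k h; simp [visPos] at h
  | cons ch rest ih =>
    intro k h
    by_cases hv : pvVis ch
    · simp only [visPos, hv, if_true] at h ⊢
      match k with
      | 0 =>
        simp only [List.getElem_cons_zero, List.drop_zero, List.drop]
        simp [visPos, hv, List.map_map, Function.comp]
      | k' + 1 =>
        have h' : k' < (visPos rest).length := by simpa using h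
        simp only [List.getElem_cons_succ, List.getElem_map, List.drop_succ_cons]
        rw [ih k' h', ← List.map_drop, List.map_map]
        apply List.map_congr_left
        intro a _
        simp only [Function.comp_apply]
        omega
    · simp only [visPos, hv, if_false, Bool.false_eq_true] at h ⊢
      have h' : k < (visPos rest).length := by simpa using h
      simp only [List.getElem_map]
      have hdr : (ch :: rest).drop ((visPos rest)[k] + 1) = rest.drop ((visPos rest)[k]) := rfl
      rw [hdr, ih k h', ← List.map_drop, List.map_map]

      apply List.map_congr_left
      intro a _
      simp only [Function.comp_apply]
      omega

theorem takeVis_spec (m : List Char) :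
    ∀ c : Int, 1 ≤ c →
      takeVis m c = (match (visPos m)[(c - 1).toNat]? with
        | some q => m.take (q + 1)
        | none => m) := by
  induction m with
  | nil => intro c _; simp [takeVis, visPos]
  | cons ch rest ih =>
    intro c hc
    by_cases hv : pvVis ch
    · simp only [visPos, hv, if_true]
      by_cases h1 : c ≤ 1
      · have : c = 1 := by omega
        subst this
        simp [takeVis, hv]
      · have hk : (c - 1).toNat = (c - 1 - 1).toNat + 1 := by omega
        rw [hk]
        simp only [takeVis, hv, if_true, h1, if_false, List.getElem?_cons_succ, List.getElem?_map]
        rw [ih (c - 1) (by omega)]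
        cases h : (visPos rest)[(c - 1 - 1).toNat]? with
        | none => simp [h]
        | some q => simp [h, List.take_succ_cons]
    · simp only [visPos, hv, if_false, Bool.false_eq_true, takeVis]
      rw [ih c hc, List.getElem?_map]
      cases h : (visPos rest)[(c - 1).toNat]? with
      | none => simp [h]
      | some q => simp [h, List.take_succ_cons]

-- visible positions never exceed the string length
theorem visPos_lt_length (l : List Char) : ∀ q ∈ visPos l, q < l.length := by
  induction l with
  | nil => simp [visPos]
  | cons ch rest ih =>
    by_cases hv : pvVis ch <;>
      simp only [visPos, hv, if_true, if_false, Bool.false_eq_true, List.mem_cons,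
        List.mem_map, List.length_cons]
    · rintro q (rfl | ⟨a, ha, rfl⟩)
      · omega
      · have := ih a ha; omega
    · rintro q ⟨a, ha, rfl⟩
      have := ih a ha; omega

-- ===== VERDICT (by name: the statement is the Claim_ definition above) =====
theorem slice_visible_text_spec : Claim_equal_slice_visible_text := by
  intro value sv count hdom
  clear hdom
  unfold Spec_slice_visible_text slice_visible_text slice_visible_text_alt
  set l := value.toList with hl
  have hvis : ((PySem.List.enumerate l 0).filter (fun p => pvVis p.2)).map (fun p => p.1)
      = (visPos l).map (fun n : Nat => (n : Int)) := by
    rw [vis_eq l 0]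
    apply List.map_congr_left
    intro a _; omega
  have hlen : PySem.List.len ((visPos l).map (fun n : Nat => (n : Int)))
      = ((visPos l).length : Int) := by
    simp [PySem.List.len_eq]
  have hcore : sliceVisLoop sv count l [] 0 false 0
      = loopC count (match (visPos l)[(max sv 0).toNat]? with
          | some q => l.drop q | none => []) [] 0 := by
    rw [loopA_skip sv count l 0]
    have h0 : (sv - 0).toNat = (max sv 0).toNat := by omega
    rw [h0, afterSkip_eq]
  set k := (max sv 0).toNat with hk
  set P := visPos l with hP
  by_cases hbig : max sv 0 ≥ (P.length : Int)
  · -- start index at or beyond the last visible character: both sides ""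
    have hnone : P[k]? = none := List.getElem?_eq_none (by omega)
    rw [hcore, hnone]
    cases count with
    | none =>
      simp only [hvis, hlen, loopC, Bool.false_eq_true, if_false, decide_eq_true hbig, if_true]
      decide
    | some c =>
      by_cases hc : c ≤ 0
      · simp [hc]
      · simp only [hvis, hlen, loopC, decide_eq_false hc, decide_eq_true hbig,
          Bool.false_eq_true, if_false, if_true]
        decide
  · -- the start position p = P[k] exists
    have hkP : k < P.length := by omega
    have hsome : P[k]? = some (P[k]'hkP) := List.getElem?_eq_getElem hkP
    rw [hcore, hsome]
    set p := P[k] with hp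
    have hplen : p ≤ l.length := le_of_lt (visPos_lt_length l p (hP ▸ List.getElem_mem hkP))
    have hpy : PySem.List.pyGetD (P.map (fun n : Nat => (n : Int))) (max sv 0) 0 = (p : Int) := by
      have h0 : (0 : Int) ≤ max sv 0 := by omega
      rw [PySem.List.pyGetD_eq_getElem _ 0 h0 (by simp; omega)]
      rw [List.getElem_map]
    have hdropall : PySem.List.slice l (some (p : Int)) (some (PySem.List.len l))
        = l.drop p := by
      rw [PySem.List.len_eq, PySem.List.slice_natCast]
      exact List.take_of_length_le (by simp)
    cases count with
    | none =>
      rw [loopC_none, List.nil_append]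
      simp only [hvis, hlen, Bool.false_eq_true, if_false, decide_eq_false hbig]
      rw [hpy, hdropall]
    | some c =>
      by_cases hc : c ≤ 0
      · simp [hc]
      · have hc1 : (1 : Int) ≤ c := by omega
        rw [loopC_some, List.nil_append, Int.sub_zero, takeVis_spec (l.drop p) c hc1]
        have hdropvis : visPos (l.drop p) = (P.drop k).map (· - p) := visPos_drop l k hkP
        have hidx : (visPos (l.drop p))[(c - 1).toNat]?
            = (P[k + (c - 1).toNat]?).map (· - p) := by
          rw [hdropvis, List.getElem?_map, List.getElem?_drop]
        have hj : max sv 0 + c - 1 = ((k + (c - 1).toNat : Nat) : Int) := by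
          push_cast; omega
        simp only [hvis, hlen, decide_eq_false hc, decide_eq_false hbig,
          Bool.false_eq_true, if_false]
        by_cases hjlt : k + (c - 1).toNat < P.length
        · -- the count-th visible char exists: end = vis[j] + 1
          set q := P[k + (c - 1).toNat] with hq
          have hq? : P[k + (c - 1).toNat]? = some q := List.getElem?_eq_getElem hjlt
          have hpq : p ≤ q := by
            rcases Nat.eq_or_lt_of_le (Nat.le_add_right k (c - 1).toNat) with he | hlt
            · have hee : P[k]? = P[k + (c - 1).toNat]? := by rw [← he]
              rw [List.getElem?_eq_getElem hkP, List.getElem?_eq_getElem hjlt] at hee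
              exact le_of_eq (Option.some.inj hee)
            · exact le_of_lt
                ((List.pairwise_iff_getElem.mp (hP ▸ visPos_sorted l)) k
                  (k + (c - 1).toNat) hkP hjlt hlt)
          have hjlt' : max sv 0 + c - 1 < (P.length : Int) := by
            rw [hj]; exact_mod_cast hjlt
          simp only [decide_eq_true hjlt', if_true]
          have hpyj : PySem.List.pyGetD (P.map (fun n : Nat => (n : Int)))
              (max sv 0 + c - 1) 0 = (q : Int) := by
            rw [hj, PySem.List.pyGetD_natCast]
            rw [List.getD_eq_getElem _ _ (by simpa using hjlt), List.getElem_map]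
          rw [hidx, hq?, hpy, hpyj]
          simp only [Option.map_some]

          have hslice : PySem.List.slice l (some (p : Int)) (some ((q : Int) + 1))
              = (l.drop p).take (q - p + 1) := by
            have hcast : (q : Int) + 1 = ((q + 1 : Nat) : Int) := by push_cast; ring
            rw [hcast, PySem.List.slice_natCast]
            congr 1
            omega
          rw [hslice]
        · -- fewer than count visible chars remain: end = len(value)
          have hq? : P[k + (c - 1).toNat]? = none := List.getElem?_eq_none (by omega)
          have hjge : ¬ (max sv 0 + c - 1 < (P.length : Int)) := by
            rw [hj]; push_cast; omega
          simp only [decide_eq_false hjge, Bool.false_eq_true, if_false]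
          rw [hidx, hq?]
          simp only [Option.map_none]
          rw [hpy, hdropall]
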